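-- pv_equiv track=rewrite | github.com/CPE202-Johnson/project1-j-gharib | perm_lex.py | perm_gen_lex
-- ===== SOURCE A (Python) =====
-- def perm_gen_lex(perm):
--     strings = []
--     #Base case
--     if (len(perm) <= 1) :
--         return [perm]
--
--     else:
--         for i, letter in enumerate(perm): #enumerated for loop, has counter i, and assigns the letter at index i to the variable letter
--             for word in perm_gen_lex(perm[:i] + perm[i+1:]): #Function that chops the word in two and stitches it back together to give the permutations
--                 strings += [letter + word]  #A list of letters th
--         return strings
-- ===== SOURCE B (Python) =====
-- def perm_gen_lex(perm):
--     # iterative breadth-first expansion: states are (prefix, remaining) pairs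
--     states = [("", perm)]
--     for _ in range(len(perm)):
--         states = [(p + s[i], s[:i] + s[i+1:]) for (p, s) in states for i in range(len(s))]
--     return [p for (p, _) in states]
-- ===== Notes on version B (the rewrite author's own statement) =====
-- stated objective: alternative
-- what changed: Replaces A's recursive pick-first-letter-and-recurse construction with an iterative breadth-first expansion of (prefix, remaining) state pairs, one round per character, collecting the prefixes at the end.
import Mathlib
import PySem

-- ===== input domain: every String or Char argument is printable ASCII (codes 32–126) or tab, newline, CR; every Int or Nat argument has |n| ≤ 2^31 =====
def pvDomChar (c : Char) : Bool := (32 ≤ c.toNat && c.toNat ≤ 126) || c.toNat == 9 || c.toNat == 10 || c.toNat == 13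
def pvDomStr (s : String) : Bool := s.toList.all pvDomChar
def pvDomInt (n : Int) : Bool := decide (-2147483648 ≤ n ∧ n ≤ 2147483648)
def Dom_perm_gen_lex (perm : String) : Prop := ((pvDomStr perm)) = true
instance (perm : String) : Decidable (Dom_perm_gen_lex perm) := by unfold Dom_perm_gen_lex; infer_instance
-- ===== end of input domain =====

-- B replaces A's recursive insertion with an iterative breadth-first expansion of
-- (prefix, remaining) states; alternative decomposition, same output order.


-- ===== PORT A =====
-- A on the character list, with a structural fuel argument (fuel = length at the top
-- call; each recursive call drops one character and one unit of fuel, so the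
-- fuel-exhausted branch is never reached — it is only a totality guard):
-- base case [cs]; else for (i, letter) in enumerate, for word in the recursion on
-- perm[:i] + perm[i+1:], append letter + word.
def permAAux (fuel : Nat) (cs : List Char) : List (List Char) :=
  if cs.length ≤ 1 then [cs]
  else
    match fuel with
    | 0 => [cs]
    | fuel' + 1 =>
      (PySem.List.enumerate cs).foldl
        (fun strings p =>
          strings ++
            (permAAux fuel' (PySem.List.slice cs none (some p.1) ++
                             PySem.List.slice cs (some (p.1 + 1)) none)).map
              (fun word => p.2 :: word)) []

def permAChars (cs : List Char) : List (List Char) :=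
  permAAux cs.length cs

def perm_gen_lex (perm : String) : List String :=
  (permAChars perm.toList).map String.ofList

-- ===== PORT B =====
-- one expansion round: each (prefix, remaining) state spawns one child per index
def stepB (states : List (List Char × List Char)) : List (List Char × List Char) :=
  states.flatMap (fun ps =>
    (PySem.List.pyRange 0 ps.2.length 1).map (fun i =>
      (ps.1 ++ [PySem.List.pyGetD ps.2 i default],
       PySem.List.slice ps.2 none (some i) ++ PySem.List.slice ps.2 (some (i + 1)) none)))

def permBChars (cs : List Char) : List (List Char) :=
  ((PySem.List.pyRange 0 cs.length 1).foldl (fun states _ => stepB states)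
      [([], cs)]).map (·.1)

def perm_gen_lex_alt (perm : String) : List String :=
  (permBChars perm.toList).map String.ofList

-- ===== PRECONDITION & SPEC =====
def Spec_perm_gen_lex (perm : String) (out : List String) : Prop := out = perm_gen_lex_alt perm
instance (perm : String) (out : List String) : Decidable (Spec_perm_gen_lex perm out) := by unfold Spec_perm_gen_lex; infer_instance

-- ===== CLAIM (what is proved, stated in full; the proofs are below) =====
def Claim_equal_perm_gen_lex : Prop := ∀ (perm : String), Dom_perm_gen_lex perm → Spec_perm_gen_lex perm (perm_gen_lex perm)

-- ===== LEMMAS AND PROOFS =====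

lemma enumerate_fst_bounds {l : List Char} {s : Int} {q : Int × Char}
    (hq : q ∈ PySem.List.enumerate l s) : s ≤ q.1 ∧ q.1 < s + l.length := by
  induction l generalizing s with
  | nil => simp [PySem.List.enumerate] at hq
  | cons x xs ih =>
    rw [PySem.List.enumerate_cons] at hq
    rcases List.mem_cons.1 hq with hq | hq
    · subst hq; simp
    · have := ih hq; simp only [List.length_cons] at *; push_cast at *; omega

lemma slice_to_nat (cs : List Char) (k : Nat) :
    PySem.List.slice cs none (some (k : Int)) = cs.take k := by
  rw [PySem.List.slice_to cs (by omega : (0:Int) ≤ (k:Int))]; simp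

lemma slice_from_nat (cs : List Char) (k : Nat) :
    PySem.List.slice cs (some ((k : Int) + 1)) none = cs.drop (k + 1) := by
  rw [PySem.List.slice_from cs (by omega : (0:Int) ≤ (k:Int) + 1)]
  have h : ((k:Int) + 1).toNat = k + 1 := by omega
  rw [h]

-- the remaining word after removing the character at an enumerate index
lemma rem_length {cs : List Char} {q : Int × Char}
    (hq : q ∈ PySem.List.enumerate cs 0) :
    (PySem.List.slice cs none (some q.1) ++
     PySem.List.slice cs (some (q.1 + 1)) none).length = cs.length - 1 := by
  have hb := enumerate_fst_bounds hq
  obtain ⟨k, hk⟩ : ∃ k : Nat, (k : Int) = q.1 := ⟨q.1.toNat, by omega⟩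
  rw [← hk, slice_to_nat, slice_from_nat]
  simp only [List.length_append, List.length_take, List.length_drop]
  omega

-- the fuel-exhausted branch is never reached when the fuel dominates the length
lemma permAAux_fuel (f1 : Nat) (f2 : Nat) (cs : List Char)
    (h1 : cs.length ≤ f1 + 1) (h2 : cs.length ≤ f2 + 1) :
    permAAux f1 cs = permAAux f2 cs := by
  induction f1 generalizing f2 cs with
  | zero =>
    have hb : cs.length ≤ 1 := by omega
    rw [permAAux.eq_def, permAAux.eq_def]
    simp [hb]
  | succ f ih =>
    by_cases hb : cs.length ≤ 1
    · rw [permAAux.eq_def, permAAux.eq_def]; simp [hb]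
    · obtain ⟨g, rfl⟩ : ∃ g, f2 = g + 1 := ⟨f2 - 1, by omega⟩
      rw [permAAux.eq_def, permAAux.eq_def]
      simp only [if_neg hb]
      apply PySem.List.foldl_congr_mem
      intro acc q hq
      have hr := rem_length hq
      congr 1
      congr 1
      exact ih _ _ (by omega) (by omega)

lemma permAAux_succ (f : Nat) (cs : List Char) (h : ¬ cs.length ≤ 1) :
    permAAux (f + 1) cs
      = (PySem.List.enumerate cs).foldl
          (fun strings p =>
            strings ++
              (permAAux f (PySem.List.slice cs none (some p.1) ++
                           PySem.List.slice cs (some (p.1 + 1)) none)).map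
                (fun word => p.2 :: word)) [] := by
  rw [permAAux.eq_def]
  simp [h]

lemma enumerate_eq (cs : List Char) (s : Int) :
    PySem.List.enumerate cs s
      = (List.range cs.length).map (fun (k : Nat) => (s + (k : Int), cs.getD k default)) := by
  induction cs generalizing s with
  | nil => simp [PySem.List.enumerate]
  | cons x xs ih =>
    rw [PySem.List.enumerate_cons, ih]
    simp only [List.length_cons, List.range_succ_eq_map, List.map_cons, List.map_map]
    congr 1
    · simp
    · apply List.map_congr_left
      intro k _
      simp only [Function.comp_def, List.getD_cons_succ, Prod.mk.injEq]
      refine ⟨by push_cast; ring, trivial⟩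

-- A's one-level expansion, for length ≥ 2
lemma permA_expand (cs : List Char) (h : ¬ cs.length ≤ 1) :
    permAChars cs
      = (List.range cs.length).flatMap
          (fun k => (permAChars (cs.take k ++ cs.drop (k + 1))).map
            (fun w => cs.getD k default :: w)) := by
  obtain ⟨m, hm⟩ : ∃ m, cs.length = m + 1 := ⟨cs.length - 1, by omega⟩
  have h0 : permAChars cs = permAAux (m + 1) cs := by unfold permAChars; rw [hm]
  rw [h0, permAAux_succ m cs h]
  rw [PySem.List.foldl_append_eq_flatMap
       (fun (q : Int × Char) =>
         (permAAux m (PySem.List.slice cs none (some q.1) ++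
                      PySem.List.slice cs (some (q.1 + 1)) none)).map
           (fun word => q.2 :: word))]
  rw [enumerate_eq cs 0, List.flatMap_map, List.nil_append]
  apply List.flatMap_congr
  intro k hk
  have hkl : k < cs.length := List.mem_range.1 hk
  simp only [zero_add, slice_to_nat, slice_from_nat]
  congr 1
  have hrl : (cs.take k ++ cs.drop (k + 1)).length = m := by
    simp only [List.length_append, List.length_take, List.length_drop]
    omega
  unfold permAChars
  exact permAAux_fuel m ((cs.take k ++ cs.drop (k + 1)).length)
    (cs.take k ++ cs.drop (k + 1)) (by rw [hrl]; omega) (by omega)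

lemma foldl_const_iterate {α β : Type} (l : List β) (f : α → α) (init : α) :
    l.foldl (fun s _ => f s) init = f^[l.length] init := by
  induction l generalizing init with
  | nil => simp
  | cons x xs ih => simp [ih, Function.iterate_succ_apply]

lemma invB (n : Nat) (states : List (List Char × List Char))
    (h : ∀ p ∈ states, p.2.length = n) :
    (stepB^[n] states).map (·.1)
      = states.flatMap (fun p => (permAChars p.2).map (p.1 ++ ·)) := by
  induction n generalizing states with
  | zero =>
    simp only [Function.iterate_zero, id_eq]
    rw [List.flatMap_congr (g := fun p => [p.1]) ?_]
    · exact List.map_eq_flatMap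
    · intro p hp
      have hnil : p.2 = [] := List.length_eq_zero_iff.1 (h p hp)
      have hA : permAChars p.2 = [p.2] := by
        unfold permAChars
        rw [permAAux.eq_def]
        simp [hnil]
      rw [hA]
      simp [hnil]
  | succ n ih =>
    rw [Function.iterate_succ_apply, ih (stepB states) ?len]
    case len =>
      intro q hq
      simp only [stepB, List.mem_flatMap, List.mem_map] at hq
      obtain ⟨p, hp, i, hi, rfl⟩ := hq
      have hlen := h p hp
      have hb := (PySem.List.mem_pyRange_one).1 hi
      obtain ⟨k, rfl⟩ : ∃ k : Nat, (k : Int) = i := ⟨i.toNat, by omega⟩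
      simp only [slice_to_nat, slice_from_nat, List.length_append,
        List.length_take, List.length_drop]
      omega
    rw [stepB, List.flatMap_assoc]
    apply List.flatMap_congr
    intro p hp
    have hlen := h p hp
    rw [List.flatMap_map, hlen, PySem.List.pyRange_zero_nat (n + 1), List.flatMap_map]
    dsimp only
    by_cases h1 : n = 0
    · -- remaining length 1: both sides are the single word p.1 ++ p.2
      subst h1
      obtain ⟨c, hc⟩ : ∃ c, p.2 = [c] := by
        cases hq : p.2 with
        | nil => rw [hq] at hlen; simp at hlen
        | cons c t =>
          rw [hq] at hlen
          cases t with
          | nil => exact ⟨c, rfl⟩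
          | cons d t' => simp at hlen
      rw [hc]
      simp [permAChars, permAAux, slice_from_nat]
    · rw [permA_expand p.2 (by omega), hlen, List.map_flatMap]
      apply List.flatMap_congr
      intro k hk
      simp only [PySem.List.pyGetD_natCast, slice_to_nat, slice_from_nat, List.map_map]
      apply List.map_congr_left
      intro w _
      simp

lemma chars_eq (cs : List Char) : permBChars cs = permAChars cs := by
  unfold permBChars
  rw [foldl_const_iterate, PySem.List.length_pyRange_one]
  have hn : ((cs.length : Int) - 0).toNat = cs.length := by omega
  rw [hn, invB cs.length [([], cs)] (by simp)]
  simp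

-- ===== VERDICT (by name: the statement is the Claim_ definition above) =====
theorem perm_gen_lex_spec : Claim_equal_perm_gen_lex := by
  intro perm _
  show perm_gen_lex perm = perm_gen_lex_alt perm
  unfold perm_gen_lex perm_gen_lex_alt
  rw [chars_eq]
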